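-- pv_equiv track=rewrite | github.com/shengdewu/apriori | algorithm/apriori.py | calcC1
-- ===== SOURCE A (Python) =====
-- class tool(object):
--     def testData(self):
--         return [[1,3,4],[2,3,5],[1,2,3,5],[2,5]]
--
--     @staticmethod
--     def toList(element):
--         val = [element]
--         return val
--
-- def calcC1(dataSet):
--     C = set()
--     for val in dataSet:
--         tmp = set(val)
--         C.update(tmp)
--     C = sorted(C)
--     C1 = list(map(tool.toList, C))
--     return C1
-- ===== SOURCE B (Python) =====
-- def calcC1(dataSet):
--     total = []
--     for row in dataSet:
--         total.extend(row)
--     total.sort()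
--     C1 = []
--     prev = None
--     for x in total:
--         if prev is None or x != prev:
--             C1.append([x])
--             prev = x
--     return C1
-- ===== Notes on version B (the rewrite author's own statement) =====
-- stated objective: alternative
-- what changed: Replaces A's build-a-set-then-sort strategy with flatten-all, sort with duplicates, then a single linear scan that emits each value once when it differs from the previous one; no set is used.
import Mathlib
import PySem

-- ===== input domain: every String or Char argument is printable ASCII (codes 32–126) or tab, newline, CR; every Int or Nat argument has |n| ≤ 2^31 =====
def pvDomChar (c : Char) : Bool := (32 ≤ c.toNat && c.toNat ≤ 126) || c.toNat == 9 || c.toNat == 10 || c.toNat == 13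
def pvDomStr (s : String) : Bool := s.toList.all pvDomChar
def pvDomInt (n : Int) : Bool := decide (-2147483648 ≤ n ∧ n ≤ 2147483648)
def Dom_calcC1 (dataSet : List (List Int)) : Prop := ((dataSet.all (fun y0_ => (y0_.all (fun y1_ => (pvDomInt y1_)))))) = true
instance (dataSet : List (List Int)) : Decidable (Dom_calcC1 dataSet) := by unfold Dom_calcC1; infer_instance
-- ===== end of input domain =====

-- B replaces A's set-then-sort by flatten, sort-with-duplicates, then one dedup scan; alternative decomposition, same cost.

-- ===== PORT A =====
-- C = set(); for val in dataSet: C.update(set(val)); C = sorted(C); return list(map(toList, C))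
def calcC1 (dataSet : List (List Int)) : List (List Int) :=
  let C : PySem.Set Int :=
    dataSet.foldl (fun C val => PySem.Set.update C (PySem.Set.ofList val)) PySem.Set.empty
  let Cs := PySem.List.sorted C (fun x => x) false
  Cs.map (fun x => [x])

-- ===== PORT B =====
-- total = []; for row: total.extend(row); total.sort(); scan emitting [x] when x differs from prev
-- loop body of B's scan: state = (C1, prev)
def stepB (st : List (List Int) × Option Int) (x : Int) : List (List Int) × Option Int :=
  match st.2 with
  | none => (st.1 ++ [[x]], some x)
  | some p => if x ≠ p then (st.1 ++ [[x]], some x) else st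

def calcC1_alt (dataSet : List (List Int)) : List (List Int) :=
  let total := dataSet.foldl (fun acc row => acc ++ row) []
  let s := PySem.List.sorted total (fun x => x) false
  (s.foldl stepB ([], none)).1

-- ===== PRECONDITION & SPEC =====
def Spec_calcC1 (dataSet : List (List Int)) (out : List (List Int)) : Prop := out = calcC1_alt dataSet
instance (dataSet : List (List Int)) (out : List (List Int)) : Decidable (Spec_calcC1 dataSet out) := by unfold Spec_calcC1; infer_instance

-- ===== CLAIM (what is proved, stated in full; the proofs are below) =====
def Claim_equal_calcC1 : Prop := ∀ (dataSet : List (List Int)), Dom_calcC1 dataSet → Spec_calcC1 dataSet (calcC1 dataSet)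

-- ===== LEMMAS AND PROOFS =====

-- proof-side dedup-with-previous, mirroring B's scan
def dd : Option Int → List Int → List Int
  | _, [] => []
  | none, x :: xs => x :: dd (some x) xs
  | some p, x :: xs => if x ≠ p then x :: dd (some x) xs else dd (some p) xs

theorem dd_nil (prev : Option Int) : dd prev [] = [] := by cases prev <;> rfl

theorem dd_none_cons (x : Int) (xs : List Int) : dd none (x :: xs) = x :: dd (some x) xs := rfl

theorem dd_some_cons (p x : Int) (xs : List Int) :
    dd (some p) (x :: xs) = if x ≠ p then x :: dd (some x) xs else dd (some p) xs := rfl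

theorem stepB_none (acc : List (List Int)) (x : Int) :
    stepB (acc, none) x = (acc ++ [[x]], some x) := rfl

theorem stepB_some (acc : List (List Int)) (p x : Int) :
    stepB (acc, some p) x = if x ≠ p then (acc ++ [[x]], some x) else (acc, some p) := by
  show (match (some p : Option Int) with
    | none => (acc ++ [[x]], some x)
    | some p => if x ≠ p then (acc ++ [[x]], some x) else (acc, some p)) = _
  simp only []

theorem foldlB_eq_dd (s : List Int) (acc : List (List Int)) (prev : Option Int) :
    (s.foldl stepB (acc, prev)).1 = acc ++ (dd prev s).map (fun x => [x]) := by
  induction s generalizing acc prev with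
  | nil => simp [dd_nil]
  | cons x xs ih =>
    cases prev with
    | none =>
      rw [List.foldl_cons, stepB_none, ih, dd_none_cons]
      simp
    | some p =>
      by_cases hxp : x ≠ p
      · rw [List.foldl_cons, stepB_some, if_pos hxp, ih, dd_some_cons, if_pos hxp]
        simp
      · rw [List.foldl_cons, stepB_some, if_neg hxp, ih, dd_some_cons, if_neg hxp]

theorem dd_some_spec (p : Int) (s : List Int) (h1 : s.Pairwise (· ≤ ·)) (h2 : ∀ y ∈ s, p ≤ y) :
    (dd (some p) s).Pairwise (· < ·) ∧ (∀ x, x ∈ dd (some p) s ↔ (x ∈ s ∧ x ≠ p)) ∧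
      (∀ y ∈ dd (some p) s, p < y) := by
  induction s generalizing p with
  | nil => simp [dd_nil]
  | cons x xs ih =>
    rcases List.pairwise_cons.mp h1 with ⟨hx, hxs⟩
    by_cases hxp : x ≠ p
    · have hpx : p < x := lt_of_le_of_ne (h2 x (List.mem_cons_self ..)) (Ne.symm hxp)
      obtain ⟨ihp, ihm, ihgt⟩ := ih x hxs hx
      rw [dd_some_cons, if_pos hxp]
      refine ⟨List.pairwise_cons.mpr ⟨fun y hy => ihgt y hy, ihp⟩, ?_, ?_⟩
      · intro z
        simp only [List.mem_cons, ihm]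
        constructor
        · rintro (rfl | ⟨hz, _⟩)
          · exact ⟨Or.inl rfl, hxp⟩
          · exact ⟨Or.inr hz, fun h => by subst h; exact absurd (hx z hz) (not_le_of_gt hpx)⟩
        · rintro ⟨(rfl | hz), hnp⟩
          · exact Or.inl rfl
          · by_cases hzx : z = x
            · exact Or.inl hzx
            · exact Or.inr ⟨hz, hzx⟩
      · intro y hy
        rcases List.mem_cons.mp hy with rfl | hy
        · exact hpx
        · exact lt_trans hpx (ihgt y hy)
    · push_neg at hxp; subst hxp
      obtain ⟨ihp, ihm, ihgt⟩ := ih x hxs hx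
      rw [dd_some_cons, if_neg (by simp)]
      refine ⟨ihp, ?_, ihgt⟩
      intro z
      rw [ihm]
      constructor
      · rintro ⟨hz, hnz⟩; exact ⟨List.mem_cons_of_mem _ hz, hnz⟩
      · rintro ⟨hz, hnz⟩
        rcases List.mem_cons.mp hz with rfl | hz
        · exact absurd rfl hnz
        · exact ⟨hz, hnz⟩

theorem dd_none_spec (s : List Int) (h1 : s.Pairwise (· ≤ ·)) :
    (dd none s).Pairwise (· < ·) ∧ (∀ x, x ∈ dd none s ↔ x ∈ s) := by
  cases s with
  | nil => simp [dd_nil]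
  | cons x xs =>
    rcases List.pairwise_cons.mp h1 with ⟨hx, hxs⟩
    obtain ⟨ihp, ihm, ihgt⟩ := dd_some_spec x xs hxs hx
    rw [dd_none_cons]
    refine ⟨List.pairwise_cons.mpr ⟨fun y hy => ihgt y hy, ihp⟩, ?_⟩
    intro z
    simp only [List.mem_cons, ihm]
    constructor
    · rintro (rfl | ⟨hz, _⟩)
      · exact Or.inl rfl
      · exact Or.inr hz
    · rintro (rfl | hz)
      · exact Or.inl rfl
      · by_cases hzx : z = x
        · exact Or.inl hzx
        · exact Or.inr ⟨hz, hzx⟩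

theorem mem_foldl_update (ds : List (List Int)) (s : PySem.Set Int) (x : Int) :
    x ∈ ds.foldl (fun C val => PySem.Set.update C (PySem.Set.ofList val)) s ↔
      x ∈ s ∨ ∃ row ∈ ds, x ∈ row := by
  induction ds generalizing s with
  | nil => simp
  | cons r rs ih =>
    simp [List.foldl_cons, ih, PySem.Set.mem_update, PySem.Set.mem_ofList, or_assoc]

theorem nodup_foldl_update (ds : List (List Int)) (s : PySem.Set Int) (hs : s.Nodup) :
    (ds.foldl (fun C val => PySem.Set.update C (PySem.Set.ofList val)) s).Nodup := by
  induction ds generalizing s with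
  | nil => exact hs
  | cons r rs ih => exact ih _ (PySem.Set.nodup_update _ _ hs)

theorem mem_foldl_append (ds : List (List Int)) (acc : List Int) (x : Int) :
    x ∈ ds.foldl (fun acc row => acc ++ row) acc ↔ x ∈ acc ∨ ∃ row ∈ ds, x ∈ row := by
  induction ds generalizing acc with
  | nil => simp
  | cons r rs ih =>
    simp [List.foldl_cons, ih, List.mem_append, or_assoc]

-- ===== VERDICT (by name: the statement is the Claim_ definition above) =====
theorem calcC1_spec : Claim_equal_calcC1 := by
  intro ds _
  unfold Spec_calcC1 calcC1 calcC1_alt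
  set C : PySem.Set Int :=
    ds.foldl (fun C val => PySem.Set.update C (PySem.Set.ofList val)) PySem.Set.empty with hC
  set total : List Int := ds.foldl (fun acc row => acc ++ row) [] with htot
  set s : List Int := PySem.List.sorted total (fun x => x) false with hs
  have hsort : s.Pairwise (· ≤ ·) := by
    simpa using PySem.List.sorted_pairwise total (fun x => x)
  obtain ⟨hddlt, hddmem⟩ := dd_none_spec s hsort
  have hmemC : ∀ x, x ∈ C ↔ ∃ row ∈ ds, x ∈ row := by
    intro x; rw [hC, mem_foldl_update]; simp [PySem.Set.empty]
  have hnC : C.Nodup := by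
    rw [hC]; exact nodup_foldl_update ds _ List.nodup_nil
  have hmemD : ∀ x, x ∈ dd none s ↔ x ∈ C := by
    intro x
    rw [hddmem x, hs, PySem.List.mem_sorted, htot, mem_foldl_append, hmemC]
    simp
  have hperm : (dd none s).Perm C :=
    (List.perm_ext_iff_of_nodup hddlt.nodup hnC).mpr hmemD
  have hsC : PySem.List.sorted C (fun x => x) false = dd none s :=
    PySem.List.sorted_eq_of_perm_of_pairwise_lt C (dd none s) (fun x => x) hperm
      (by simpa using hddlt)
  rw [foldlB_eq_dd]
  show List.map (fun x => [x]) (PySem.List.sorted C (fun x => x) false)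
      = [] ++ List.map (fun x => [x]) (dd none (PySem.List.sorted total (fun x => x) false))
  rw [← hs, hsC]
  simp
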